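-- pv_equiv track=rewrite | github.com/huafei1137/ILOC | lra_testing/scheduler.py | getLifeTime
-- ===== SOURCE A (Python) =====
-- from collections import defaultdict
--
-- def getLifeTime(twoD):
-- 	lifetimeDict = defaultdict(int)
--
-- 	for i in range(len(twoD)):
-- 		currInstr = twoD[i]
-- 		for op in currInstr:
-- 			if op[0] != 'r':
-- 				continue
-- 			if op == '=>' and currInstr[0] != 'store':
-- 				break
-- 			if i > lifetimeDict[op]:
-- 				lifetimeDict[op] = i
-- 	return lifetimeDict
-- ===== SOURCE B (Python) =====
-- from collections import defaultdict
--
-- def getLifeTime(twoD):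
--     # Pass 1: scan instructions BACKWARD; the first sighting of a register while
--     # scanning backward is its last-use line (first-seen-wins, no running max).
--     last = {}
--     for i in range(len(twoD) - 1, -1, -1):
--         for op in twoD[i]:
--             if op[0] != 'r':
--                 continue
--             if op not in last:
--                 last[op] = i
--     # Pass 2: forward scan only to reproduce first-occurrence key order.
--     result = defaultdict(int)
--     for instr in twoD:
--         for op in instr:
--             if op[0] == 'r' and op not in result:
--                 result[op] = last[op]
--     return result
-- ===== Notes on version B (the rewrite author's own statement) =====
-- stated objective: alternative
-- what changed: Replaces the forward scan with a defaultdict-read plus running-max update by a backward scan where the first sighting of a register wins (no max, no defaultdict read), plus a forward pass that only fixes the first-occurrence key order.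
import Mathlib
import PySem

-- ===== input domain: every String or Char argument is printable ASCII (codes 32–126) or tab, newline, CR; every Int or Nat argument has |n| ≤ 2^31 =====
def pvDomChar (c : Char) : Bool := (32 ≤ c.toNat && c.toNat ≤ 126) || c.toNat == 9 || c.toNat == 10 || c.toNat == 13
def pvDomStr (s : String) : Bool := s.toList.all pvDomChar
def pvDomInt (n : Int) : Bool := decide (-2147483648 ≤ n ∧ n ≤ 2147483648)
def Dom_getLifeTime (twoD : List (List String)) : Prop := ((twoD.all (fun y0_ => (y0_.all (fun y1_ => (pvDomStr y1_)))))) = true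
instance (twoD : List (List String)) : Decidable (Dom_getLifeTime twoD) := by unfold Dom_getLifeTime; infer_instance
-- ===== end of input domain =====

-- B replaces A's forward scan with defaultdict running-max updates by a backward first-seen-wins
-- scan plus a forward key-ordering pass (alternative decomposition, same cost); return value only.

-- ===== PORT A =====

-- op[0] == 'r' (pyGet? is none on the empty string, where Python raises — excluded by Pre_)
def pvReg (op : String) : Bool := PySem.Str.pyGet? op 0 == some 'r'

-- the inner 'for op in currInstr' loop of A, with continue / break / defaultdict read-then-update
def pvInnerA (i : Int) (currInstr : List String) : List String → PySem.Dict String Int → PySem.Dict String Int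
  | [], d => d
  | op :: rest, d =>
    if pvReg op = false then pvInnerA i currInstr rest d          -- continue
    else if op == "=>" && ((PySem.List.pyGet? currInstr 0).getD "" != "store") then d  -- break
    else
      -- lifetimeDict[op] on a defaultdict(int): inserts 0 if the key is absent
      let d1 := if d.contains op then d else d.insert op 0
      let d2 := if i > d1.getD op 0 then d1.insert op i else d1
      pvInnerA i currInstr rest d2

def getLifeTime (twoD : List (List String)) : List (String × Int) :=
  ((PySem.List.pyRange 0 (twoD.length : Int) 1).foldl
    (fun d i => pvInnerA i (PySem.List.pyGetD twoD i []) (PySem.List.pyGetD twoD i []) d)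
    PySem.Dict.empty).items

-- ===== PORT B =====

-- pass 1 inner loop: first-seen-wins while scanning backward
def pvInnerB1 (i : Int) : List String → PySem.Dict String Int → PySem.Dict String Int
  | [], m => m
  | op :: rest, m =>
    if pvReg op = false then pvInnerB1 i rest m
    else if m.contains op then pvInnerB1 i rest m
    else pvInnerB1 i rest (m.insert op i)

def pvLast (twoD : List (List String)) : PySem.Dict String Int :=
  (PySem.List.pyRange ((twoD.length : Int) - 1) (-1) (-1)).foldl
    (fun m i => pvInnerB1 i (PySem.List.pyGetD twoD i []) m) PySem.Dict.empty

def getLifeTime_alt (twoD : List (List String)) : List (String × Int) :=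
  (twoD.foldl (fun d instr =>
      instr.foldl (fun d op =>
        -- last[op]: the key is always present here (op is a register occurring in twoD)
        if pvReg op && !(d.contains op) then d.insert op ((pvLast twoD).getD op 0) else d) d)
    PySem.Dict.empty).items

-- ===== PRECONDITION & SPEC =====
-- Pre_ excludes instructions containing an empty-string operand: there op[0] raises IndexError in
-- A (and in B alike).
def Pre_getLifeTime (twoD : List (List String)) : Prop := ∀ instr ∈ twoD, ∀ op ∈ instr, op ≠ ""
instance (twoD : List (List String)) : Decidable (Pre_getLifeTime twoD) := by unfold Pre_getLifeTime; infer_instance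
def pvWitness_getLifeTime : List (List String) := [["loadI", "4", "=>", "r1"], ["add", "r1", "r1", "=>", "r2"], ["store", "r2", "=>", "r1"]]

def Spec_getLifeTime (twoD : List (List String)) (out : List (String × Int)) : Prop := out = getLifeTime_alt twoD
instance (twoD : List (List String)) (out : List (String × Int)) : Decidable (Spec_getLifeTime twoD out) := by unfold Spec_getLifeTime; infer_instance

-- ===== CLAIM (what is proved, stated in full; the proofs are below) =====
def Claim_equal_getLifeTime : Prop := ∀ (twoD : List (List String)), Dom_getLifeTime twoD → Pre_getLifeTime twoD → Spec_getLifeTime twoD (getLifeTime twoD)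

-- ===== LEMMAS AND PROOFS =====

-- first-occurrence-ordered list of register operands
def pvFK (twoD : List (List String)) : List String :=
  PySem.Set.ofList (twoD.flatMap (fun instr => instr.filter pvReg))

-- index of the last instruction containing op (0 if none)
def pvLI (twoD : List (List String)) (op : String) : Int :=
  (PySem.List.enumerate twoD 0).foldl (fun acc p => if op ∈ p.2 then p.1 else acc) 0

-- first hit in a pair list (pass-1 traversal order)
def pvFirstHit (op : String) : List (Int × List String) → Option Int
  | [] => none
  | p :: rest => if pvReg op = true ∧ op ∈ p.2 then some p.1 else pvFirstHit op rest

theorem pvLI_append (ys : List (List String)) (instr : List String) (op : String) :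
    pvLI (ys ++ [instr]) op = if op ∈ instr then (ys.length : Int) else pvLI ys op := by
  simp [pvLI, PySem.List.enumerate_append, PySem.List.enumerate]

theorem pvLI_bounds (ys : List (List String)) (op : String) :
    0 ≤ pvLI ys op ∧ pvLI ys op ≤ (ys.length : Int) := by
  induction ys using List.reverseRecOn with
  | nil => simp [pvLI, PySem.List.enumerate]
  | append_singleton ys instr ih =>
    rw [pvLI_append]
    by_cases h : op ∈ instr <;> simp [h] <;> omega

theorem pvFK_append (ys : List (List String)) (instr : List String) :
    pvFK (ys ++ [instr]) = PySem.Set.update (pvFK ys) (instr.filter pvReg) := by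
  simp [pvFK, PySem.Set.ofList_append]

theorem pvFK_mem (twoD : List (List String)) (k : String) (h : k ∈ pvFK twoD) :
    pvReg k = true ∧ ∃ instr ∈ twoD, k ∈ instr := by
  rw [pvFK, PySem.Set.mem_ofList, List.mem_flatMap] at h
  obtain ⟨instr, hi, hk⟩ := h
  rw [List.mem_filter] at hk
  exact ⟨hk.2, instr, hi, hk.1⟩

theorem pvReg_ne_arrow (op : String) (h : pvReg op = true) : (op == "=>") = false := by
  by_cases h2 : op = "=>"
  · subst h2; exact absurd h (by decide)
  · exact beq_eq_false_iff_ne.mpr h2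

theorem pvKeys_mkmap (S : List String) (v : String → Int) :
    (PySem.Dict.mk (S.map (fun k => (k, v k)))).keys = S := by
  simp [PySem.Dict.keys, Function.comp_def]

theorem pvContains_mkmap (S : List String) (v : String → Int) (op : String) :
    (PySem.Dict.mk (S.map (fun k => (k, v k)))).contains op = decide (op ∈ S) := by
  have h := PySem.Dict.contains_iff_mem_keys (PySem.Dict.mk (S.map (fun k => (k, v k)))) op
  rw [pvKeys_mkmap] at h
  by_cases hm : op ∈ S
  · rw [h.mpr hm]; simp [hm]
  · have hc : (PySem.Dict.mk (S.map (fun k => (k, v k)))).contains op = false := by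
      rcases Bool.eq_false_or_eq_true ((PySem.Dict.mk (S.map (fun k => (k, v k)))).contains op) with hc | hc
      · exact absurd (h.mp hc) hm
      · exact hc
    rw [hc]; simp [hm]

theorem pvGetD_mkmap (S : List String) (v : String → Int) (op : String)
    (hS : S.Nodup) (hop : op ∈ S) :
    (PySem.Dict.mk (S.map (fun k => (k, v k)))).getD op 0 = v op := by
  apply PySem.Dict.getD_of_mem_items
  · exact List.mem_map_of_mem hop
  · rw [pvKeys_mkmap]; exact hS

-- the A inner loop, fully characterised on a dict of shape S ↦ v with values ≤ n
theorem pvInnerA_spec (n : Int) (hn : 0 ≤ n) (curr : List String) :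
    ∀ (ops S : List String) (v : String → Int), S.Nodup → (∀ k ∈ S, v k ≤ n) →
    pvInnerA n curr ops (PySem.Dict.mk (S.map (fun k => (k, v k)))) =
      PySem.Dict.mk ((PySem.Set.update S (ops.filter pvReg)).map
        (fun k => (k, if k ∈ ops.filter pvReg then n else v k))) := by
  intro ops
  induction ops with
  | nil => intro S v _ _; simp [pvInnerA, PySem.Set.update]
  | cons op rest ih =>
    intro S v hS hv
    simp only [pvInnerA]
    cases hreg : pvReg op with
    | false =>
      rw [if_pos rfl, ih S v hS hv]
      simp [hreg]
    | true =>
      rw [if_neg (by simp), if_neg (by simp [pvReg_ne_arrow op hreg])]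
      by_cases hmem : op ∈ S
      · -- key present: value becomes max(v op, n) = n
        have hcont : (PySem.Dict.mk (S.map (fun k => (k, v k)))).contains op = true := by
          rw [pvContains_mkmap]; simp [hmem]
        rw [hcont, if_pos (show (true : Bool) = true from rfl)]
        have hget : (PySem.Dict.mk (S.map (fun k => (k, v k)))).getD op 0 = v op :=
          pvGetD_mkmap S v op hS hmem
        rw [hget]
        have hstep : (if n > v op then
              (PySem.Dict.mk (S.map (fun k => (k, v k)))).insert op n
            else PySem.Dict.mk (S.map (fun k => (k, v k)))) =
            PySem.Dict.mk (S.map (fun k => (k, if k = op then n else v k))) := by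
          by_cases hlt : n > v op
          · rw [if_pos hlt]
            apply PySem.Dict.ext
            rw [PySem.Dict.items_insert_of_contains _ _ hcont]
            show (S.map (fun k => (k, v k))).map _ = _
            rw [List.map_map]
            apply List.map_congr_left
            intro k _
            by_cases hk : k = op <;> simp [hk]
          · rw [if_neg hlt]
            have hvo : v op = n := le_antisymm (hv op hmem) (by omega)
            congr 1
            apply List.map_congr_left
            intro k _
            by_cases hk : k = op <;> simp [hk, hvo]
        rw [hstep]
        rw [ih S _ hS (by
          intro k hk
          by_cases h : k = op
          · simp [h]
          · simp [h]; exact hv k hk)]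
        rw [List.filter_cons, if_pos hreg, PySem.Set.update_cons, PySem.Set.add_of_mem hmem]
        congr 1
        apply List.map_congr_left
        intro k hk
        by_cases hko : k = op
        · subst hko; simp
        · simp [hko, List.mem_cons]
      · -- key absent: inserted with value 0, then raised to n (or n = 0 already)
        have hcont : (PySem.Dict.mk (S.map (fun k => (k, v k)))).contains op = false := by
          rw [pvContains_mkmap]; simp [hmem]
        rw [hcont, if_neg (show ¬((false : Bool) = true) by simp)]
        have hd1 : (PySem.Dict.mk (S.map (fun k => (k, v k)))).insert op 0 =
            PySem.Dict.mk ((S ++ [op]).map (fun k => (k, if k = op then 0 else v k))) := by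
          apply PySem.Dict.ext
          rw [PySem.Dict.items_insert_of_not_contains _ _ hcont]
          show S.map (fun k => (k, v k)) ++ [(op, 0)] = _
          rw [List.map_append]
          congr 1
          · apply List.map_congr_left
            intro k hk
            have hne : k ≠ op := fun h => hmem (h ▸ hk)
            simp [hne]
          · simp
        rw [hd1]
        have hnodup : (S ++ [op]).Nodup := by
          simp [List.nodup_append, hS]
          exact fun a ha hao => hmem (hao ▸ ha)
        have hget : (PySem.Dict.mk ((S ++ [op]).map (fun k => (k, if k = op then 0 else v k)))).getD op 0 = 0 := by
          rw [pvGetD_mkmap _ _ _ hnodup (by simp)]; simp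
        rw [hget]
        have hstep : (if n > 0 then
              (PySem.Dict.mk ((S ++ [op]).map (fun k => (k, if k = op then 0 else v k)))).insert op n
            else PySem.Dict.mk ((S ++ [op]).map (fun k => (k, if k = op then 0 else v k)))) =
            PySem.Dict.mk ((S ++ [op]).map (fun k => (k, if k = op then n else v k))) := by
          by_cases hlt : n > 0
          · rw [if_pos hlt]
            apply PySem.Dict.ext
            have hc2 : (PySem.Dict.mk ((S ++ [op]).map (fun k => (k, if k = op then 0 else v k)))).contains op = true := by
              rw [pvContains_mkmap]; simp
            rw [PySem.Dict.items_insert_of_contains _ _ hc2]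
            show ((S ++ [op]).map _).map _ = _
            rw [List.map_map]
            apply List.map_congr_left
            intro k _
            by_cases hk : k = op <;> simp [hk]
          · rw [if_neg hlt]
            have hn0 : n = 0 := by omega
            subst hn0
            rfl
        rw [hstep]
        rw [ih (S ++ [op]) _ hnodup (by
          intro k hk
          by_cases h : k = op
          · simp [h]
          · simp only [h, if_false]
            rcases List.mem_append.mp hk with h2 | h2
            · exact hv k h2
            · simp at h2; exact absurd h2 h)]
        rw [List.filter_cons, if_pos hreg, PySem.Set.update_cons, PySem.Set.add_of_not_mem hmem]
        congr 1
        apply List.map_congr_left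
        intro k hk
        by_cases hko : k = op
        · subst hko; simp
        · simp [hko, List.mem_cons]

-- A's dict after the whole double loop
theorem pvA_spec (twoD : List (List String)) :
    (PySem.List.pyRange 0 (twoD.length : Int) 1).foldl
      (fun d i => pvInnerA i (PySem.List.pyGetD twoD i []) (PySem.List.pyGetD twoD i []) d)
      PySem.Dict.empty =
    PySem.Dict.mk ((pvFK twoD).map (fun k => (k, pvLI twoD k))) := by
  have hfold : (PySem.List.pyRange 0 (twoD.length : Int) 1).foldl
      (fun d i => pvInnerA i (PySem.List.pyGetD twoD i []) (PySem.List.pyGetD twoD i []) d)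
      PySem.Dict.empty =
      (PySem.List.enumerate twoD 0).foldl (fun d p => pvInnerA p.1 p.2 p.2 d) PySem.Dict.empty := by
    rw [PySem.List.enumerate_eq_map_pyRange twoD [], List.foldl_map]
    rfl
  rw [hfold]
  clear hfold
  induction twoD using List.reverseRecOn with
  | nil => rfl
  | append_singleton ys instr ih =>
    rw [PySem.List.enumerate_append, List.foldl_append, ih]
    have henum : PySem.List.enumerate [instr] (0 + (ys.length : Int)) = [((ys.length : Int), instr)] := by
      simp [PySem.List.enumerate_cons, PySem.List.enumerate_nil]
    rw [henum, List.foldl_cons, List.foldl_nil]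
    rw [pvInnerA_spec (ys.length : Int) (Int.natCast_nonneg _) instr instr (pvFK ys) (pvLI ys)
      (PySem.Set.nodup_ofList _) (fun k _ => (pvLI_bounds ys k).2)]
    rw [pvFK_append]
    congr 1
    apply List.map_congr_left
    intro k hk
    have hreg : pvReg k = true := by
      rcases (PySem.Set.mem_update _ _ _).mp hk with h | h
      · exact (pvFK_mem ys k h).1
      · exact (List.mem_filter.mp h).2
    have hiff : k ∈ instr.filter pvReg ↔ k ∈ instr := by simp [List.mem_filter, hreg]
    rw [pvLI_append]
    by_cases hmem : k ∈ instr <;> simp [hmem, hiff]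

-- pass-1 inner loop of B: get? after first-seen-wins inserts
theorem pvInnerB1_get (i : Int) :
    ∀ (ops : List String) (m : PySem.Dict String Int) (op : String),
    (pvInnerB1 i ops m).get? op =
      if m.contains op = false ∧ pvReg op = true ∧ op ∈ ops then some i else m.get? op := by
  intro ops
  induction ops with
  | nil => simp [pvInnerB1]
  | cons op' rest ih =>
    intro m op
    simp only [pvInnerB1]
    cases hreg : pvReg op' with
    | false =>
      rw [if_pos rfl, ih]
      by_cases hko : op = op'
      · subst hko; simp [hreg]
      · simp [List.mem_cons, hko]
    | true =>
      rw [if_neg (by simp)]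
      cases hc : m.contains op' with
      | true =>
        rw [if_pos rfl, ih]
        by_cases hko : op = op'
        · subst hko; simp [hc]
        · simp [List.mem_cons, hko]
      | false =>
        rw [if_neg (by simp), ih]
        by_cases hko : op = op'
        · subst hko
          have h1 : (m.insert op i).contains op = true := PySem.Dict.contains_insert_self m op i
          simp [h1, hc, hreg, PySem.Dict.get?_insert_self]
        · have h1 : (m.insert op' i).contains op = m.contains op := by
            rw [PySem.Dict.contains_insert]
            simp [show (op == op') = false from beq_eq_false_iff_ne.mpr hko]
          have h2 : (m.insert op' i).get? op = m.get? op := PySem.Dict.get?_insert_of_ne m i hko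
          rw [h1, h2]
          simp [List.mem_cons, hko]

-- pass 1 as a whole: get? computes the first hit of the traversal
theorem pvPass1_get :
    ∀ (l : List (Int × List String)) (m : PySem.Dict String Int) (op : String),
    ((l.foldl (fun m p => pvInnerB1 p.1 p.2 m) m)).get? op =
      if m.contains op = true then m.get? op else pvFirstHit op l := by
  intro l
  induction l with
  | nil =>
    intro m op
    cases hc : m.contains op with
    | true => simp [hc]
    | false =>
      simp only [List.foldl_nil, pvFirstHit]
      rw [if_neg (by simp)]
      exact (PySem.Dict.get?_eq_none_iff_contains m op).mpr hc
  | cons p l ih =>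
    intro m op
    rw [List.foldl_cons, ih]
    have hget := pvInnerB1_get p.1 p.2 m op
    cases hc : m.contains op with
    | true =>
      have hg2 : (pvInnerB1 p.1 p.2 m).get? op = m.get? op := by
        rw [hget, if_neg (by simp [hc])]
      have hc2 : (pvInnerB1 p.1 p.2 m).contains op = true := by
        rw [PySem.Dict.contains_eq_isSome_get?, hg2, ← PySem.Dict.contains_eq_isSome_get?, hc]
      rw [if_pos hc2, hg2, if_pos rfl]
    | false =>
      by_cases hhit : pvReg op = true ∧ op ∈ p.2
      · have hg2 : (pvInnerB1 p.1 p.2 m).get? op = some p.1 := by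
          rw [hget, if_pos ⟨hc, hhit.1, hhit.2⟩]
        have hc2 : (pvInnerB1 p.1 p.2 m).contains op = true := by
          rw [PySem.Dict.contains_eq_isSome_get?, hg2]; rfl
        rw [if_pos hc2, hg2, if_neg (by simp)]
        simp [pvFirstHit, hhit]
      · have hg2 : (pvInnerB1 p.1 p.2 m).get? op = m.get? op := by
          rw [hget, if_neg (fun h => hhit ⟨h.2.1, h.2.2⟩)]
        have hc2 : (pvInnerB1 p.1 p.2 m).contains op = false := by
          rw [PySem.Dict.contains_eq_isSome_get?, hg2, ← PySem.Dict.contains_eq_isSome_get?, hc]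
        rw [if_neg (by simp [hc2]), if_neg (by simp)]
        simp only [pvFirstHit]
        rw [if_neg hhit]

-- first hit of the reversed enumeration = last instruction index containing op
theorem pvFirstHit_rev (op : String) (hreg : pvReg op = true) :
    ∀ (ys : List (List String)), (∃ instr ∈ ys, op ∈ instr) →
    pvFirstHit op (PySem.List.enumerate ys 0).reverse = some (pvLI ys op) := by
  intro ys
  induction ys using List.reverseRecOn with
  | nil => intro h; simp at h
  | append_singleton ys instr ih =>
    intro h
    rw [PySem.List.enumerate_append]
    have henum : PySem.List.enumerate [instr] (0 + (ys.length : Int)) = [((ys.length : Int), instr)] := by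
      simp [PySem.List.enumerate_cons, PySem.List.enumerate_nil]
    rw [henum, List.reverse_append, List.reverse_singleton, List.singleton_append]
    rw [pvFirstHit, pvLI_append]
    by_cases hmem : op ∈ instr
    · simp [hreg, hmem]
    · rw [if_neg (fun h2 => hmem h2.2), if_neg hmem]
      apply ih
      rcases h with ⟨instr', hi, hk⟩
      rcases List.mem_append.mp hi with h2 | h2
      · exact ⟨instr', h2, hk⟩
      · simp at h2; subst h2; exact absurd hk hmem

theorem pvLast_get (twoD : List (List String)) (op : String) (hreg : pvReg op = true)
    (hocc : ∃ instr ∈ twoD, op ∈ instr) :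
    (pvLast twoD).get? op = some (pvLI twoD op) := by
  rw [pvLast]
  have hrange : PySem.List.pyRange ((twoD.length : Int) - 1) (-1) (-1) =
      (PySem.List.pyRange 0 (twoD.length : Int) 1).reverse := by
    rw [PySem.List.pyRange_neg_one_eq_reverse]
    norm_num
  rw [hrange]
  have hfold : ((PySem.List.pyRange 0 (twoD.length : Int) 1).reverse.foldl
      (fun m i => pvInnerB1 i (PySem.List.pyGetD twoD i []) m) PySem.Dict.empty) =
      ((PySem.List.enumerate twoD 0).reverse.foldl (fun m p => pvInnerB1 p.1 p.2 m) PySem.Dict.empty) := by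
    rw [PySem.List.enumerate_eq_map_pyRange twoD [], ← List.map_reverse, List.foldl_map]
    rfl
  rw [hfold, pvPass1_get]
  rw [if_neg (by simp [PySem.Dict.contains_empty])]
  exact pvFirstHit_rev op hreg twoD hocc

-- pass-2 inner loop of B: insert-if-absent with a fixed value function appends new keys
theorem pvInnerB2_spec (g : String → Int) :
    ∀ (ops S : List String), S.Nodup →
    (ops.foldl (fun d op => if pvReg op && !(d.contains op) then d.insert op (g op) else d)
        (PySem.Dict.mk (S.map (fun k => (k, g k))))) =
      PySem.Dict.mk ((PySem.Set.update S (ops.filter pvReg)).map (fun k => (k, g k))) := by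
  intro ops
  induction ops with
  | nil => intro S _; simp [PySem.Set.update]
  | cons op rest ih =>
    intro S hS
    cases hreg : pvReg op with
    | false =>
      rw [List.foldl_cons]
      simp only [hreg, Bool.false_and, Bool.false_eq_true, if_false]
      rw [ih S hS, List.filter_cons, if_neg (by simp [hreg])]
    | true =>
      by_cases hmem : op ∈ S
      · have hc : (PySem.Dict.mk (S.map (fun k => (k, g k)))).contains op = true := by
          rw [pvContains_mkmap]; simp [hmem]
        rw [List.foldl_cons]
        simp only [hc, hreg, Bool.not_true, Bool.and_false, Bool.false_eq_true, if_false]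
        rw [ih S hS, List.filter_cons, if_pos hreg, PySem.Set.update_cons, PySem.Set.add_of_mem hmem]
      · have hc : (PySem.Dict.mk (S.map (fun k => (k, g k)))).contains op = false := by
          rw [pvContains_mkmap]; simp [hmem]
        rw [List.foldl_cons]
        simp only [hc, hreg, Bool.not_false, Bool.and_true, if_true]
        have hins : (PySem.Dict.mk (S.map (fun k => (k, g k)))).insert op (g op) =
            PySem.Dict.mk ((S ++ [op]).map (fun k => (k, g k))) := by
          apply PySem.Dict.ext
          rw [PySem.Dict.items_insert_of_not_contains _ _ hc]
          show S.map (fun k => (k, g k)) ++ [(op, g op)] = _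
          rw [List.map_append]
          rfl
        rw [hins, ih (S ++ [op]) (by
          simp [List.nodup_append, hS]
          exact fun a ha hao => hmem (hao ▸ ha))]
        rw [List.filter_cons, if_pos hreg, PySem.Set.update_cons, PySem.Set.add_of_not_mem hmem]

-- pass 2 of B, for an arbitrary fixed value function
theorem pvPass2_spec (g : String → Int) (zs : List (List String)) :
    (zs.foldl (fun d instr =>
        instr.foldl (fun d op => if pvReg op && !(d.contains op) then d.insert op (g op) else d) d)
      PySem.Dict.empty) =
    PySem.Dict.mk ((pvFK zs).map (fun k => (k, g k))) := by
  induction zs using List.reverseRecOn with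
  | nil => rfl
  | append_singleton ys instr ih =>
    rw [List.foldl_append, List.foldl_cons, List.foldl_nil, ih]
    rw [pvInnerB2_spec g instr (pvFK ys) (PySem.Set.nodup_ofList _)]
    rw [pvFK_append]

-- ===== VERDICT (by name: the statement is the Claim_ definition above) =====
theorem getLifeTime_spec : Claim_equal_getLifeTime := by
  intro twoD _ _
  show getLifeTime twoD = getLifeTime_alt twoD
  rw [getLifeTime, getLifeTime_alt, pvA_spec, pvPass2_spec]
  show (pvFK twoD).map (fun k => (k, pvLI twoD k)) = (pvFK twoD).map _
  apply List.map_congr_left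
  intro k hk
  obtain ⟨hreg, hocc⟩ := pvFK_mem twoD k hk
  rw [PySem.Dict.getD_eq_get?_getD, pvLast_get twoD k hreg hocc]
  rfl
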